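-- pv_equiv track=rewrite | github.com/SirSerendip/nanoclaw-jedi-style | container/transcriber/src/transcriber/formatting.py | _build_speaker_map
-- ===== SOURCE A (Python) =====
-- from typing import Dict, Iterable, List
--
-- def _build_speaker_map(segments: Iterable[Dict]) -> Dict[str, str]:
--     mapping: Dict[str, str] = {}
--     ordinal = 1
--     for segment in segments:
--         label = segment.get("speaker")
--         if not label or label in mapping:
--             continue
--         mapping[label] = f"Speaker {ordinal}"
--         ordinal += 1
--     return mapping
-- ===== SOURCE B (Python) =====
-- def _build_speaker_map(segments):
--     labels = [s.get("speaker") for s in segments]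
--     return {
--         label: f"Speaker {len({x for x in labels[:i] if x}) + 1}"
--         for i, label in enumerate(labels)
--         if label and label not in labels[:i]
--     }
-- ===== Notes on version B (the rewrite author's own statement) =====
-- stated objective: alternative
-- what changed: A's single pass with a mutable mapping and a running ordinal counter is replaced by a stateless index-based comprehension: a label is kept iff it does not occur in the prefix labels[:i], and its ordinal is recomputed from scratch as the number of distinct truthy labels in that prefix plus one (O(n^2) prefix scans instead of incremental state).
import Mathlib
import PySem

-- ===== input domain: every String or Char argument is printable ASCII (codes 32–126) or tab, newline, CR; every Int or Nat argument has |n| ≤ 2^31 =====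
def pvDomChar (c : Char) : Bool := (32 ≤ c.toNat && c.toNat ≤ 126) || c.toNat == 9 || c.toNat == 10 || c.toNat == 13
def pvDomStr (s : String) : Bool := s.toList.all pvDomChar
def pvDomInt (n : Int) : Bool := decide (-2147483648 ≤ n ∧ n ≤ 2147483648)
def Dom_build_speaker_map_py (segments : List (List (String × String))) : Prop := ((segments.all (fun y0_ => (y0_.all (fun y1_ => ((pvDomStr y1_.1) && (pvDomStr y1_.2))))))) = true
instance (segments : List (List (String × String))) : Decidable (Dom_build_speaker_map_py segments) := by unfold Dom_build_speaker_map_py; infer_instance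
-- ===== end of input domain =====

-- B replaces A's single stateful pass (mutable mapping + running ordinal counter) by a
-- stateless index-based comprehension: a label is kept iff absent from the prefix
-- labels[:i], and its ordinal is recomputed as 1 + the number of distinct truthy labels
-- in that prefix; objective: alternative (quadratic prefix scans instead of state).

-- ===== PORT A =====
-- one loop step of A: read segment.get("speaker"); skip falsy or already-mapped labels,
-- otherwise insert "Speaker <ordinal>" and bump the ordinal
def pvStepA (st : PySem.Dict String String × Int) (segment : List (String × String)) :
    PySem.Dict String String × Int :=
  match (PySem.Dict.mk segment).get? "speaker" with
  | none => st
  | some l =>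
    if l = "" ∨ st.1.contains l = true then st
    else (st.1.insert l ("Speaker " ++ PySem.Int.toStr st.2), st.2 + 1)

def build_speaker_map_py (segments : List (List (String × String))) : List (String × String) :=
  (segments.foldl pvStepA (PySem.Dict.empty, 1)).1.items

-- ===== PORT B =====
-- the truthiness filter 'if x' on an element of labels (None and "" are falsy)
def pvTruthy : Option String → Option String
  | none => none
  | some l => if l = "" then none else some l

-- the body of the dict comprehension at one (i, label) of enumerate(labels):
-- keep label iff it is truthy and not in labels[:i]; its ordinal is
-- len({x for x in labels[:i] if x}) + 1
def pvPick (labels : List (Option String)) (il : Int × Option String) :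
    Option (String × String) :=
  match il.2 with
  | none => none
  | some label =>
    if label = "" ∨ some label ∈ PySem.List.slice labels none (some il.1) then none
    else some (label, "Speaker " ++ PySem.Int.toStr
      (((PySem.Set.ofList ((PySem.List.slice labels none (some il.1)).filterMap pvTruthy)).length : Int) + 1))

-- the kept keys are pairwise distinct (each is absent from its prefix), so the dict
-- comprehension's items are exactly this filterMap list in order
def build_speaker_map_py_alt (segments : List (List (String × String))) : List (String × String) :=
  let labels := segments.map (fun s => (PySem.Dict.mk s).get? "speaker")
  (PySem.List.enumerate labels 0).filterMap (pvPick labels)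

-- ===== PRECONDITION & SPEC =====
def Spec_build_speaker_map_py (segments : List (List (String × String))) (out : List (String × String)) : Prop := out = build_speaker_map_py_alt segments
instance (segments : List (List (String × String))) (out : List (String × String)) : Decidable (Spec_build_speaker_map_py segments out) := by unfold Spec_build_speaker_map_py; infer_instance

-- ===== CLAIM (what is proved, stated in full; the proofs are below) =====
def Claim_equal_build_speaker_map_py : Prop := ∀ (segments : List (List (String × String))), Dom_build_speaker_map_py segments → Spec_build_speaker_map_py segments (build_speaker_map_py segments)

-- ===== LEMMAS AND PROOFS =====

-- the common normal form: the first-appearance list of truthy labels not yet seen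
def pvCollect : List (Option String) → List String → List String
  | [], _ => []
  | o :: rest, seen =>
    match pvTruthy o with
    | none => pvCollect rest seen
    | some l => if l ∈ seen then pvCollect rest seen else l :: pvCollect rest (seen ++ [l])

-- numbering a list of fresh labels from a starting ordinal
def pvNumberFrom : Int → List String → List (String × String)
  | _, [] => []
  | i, l :: ls => (l, "Speaker " ++ PySem.Int.toStr i) :: pvNumberFrom (i + 1) ls

def pvLabelOf (s : List (String × String)) : Option String :=
  (PySem.Dict.mk s).get? "speaker"

theorem pvFoldA_items (segs : List (List (String × String))) (m : PySem.Dict String String)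
    (i : Int) (seen : List String) (hnd : m.keys.Nodup)
    (hc : ∀ l, m.contains l = true ↔ l ∈ seen) :
    (segs.foldl pvStepA (m, i)).1.items
      = m.items ++ pvNumberFrom i (pvCollect (segs.map pvLabelOf) seen) := by
  induction segs generalizing m i seen with
  | nil => simp [pvCollect, pvNumberFrom]
  | cons s rest ih =>
    simp only [List.foldl_cons, List.map_cons, pvStepA, pvCollect, pvLabelOf]
    cases hg : (PySem.Dict.mk s).get? "speaker" with
    | none =>
      simp only [pvTruthy]
      exact ih m i seen hnd hc
    | some l =>
      by_cases he : l = ""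
      · simp only [pvTruthy, if_pos he]
        rw [if_pos (Or.inl he)]
        exact ih m i seen hnd hc
      · simp only [pvTruthy, if_neg he]
        by_cases hm : l ∈ seen
        · rw [if_pos (Or.inr ((hc l).2 hm)), if_pos hm]
          exact ih m i seen hnd hc
        · have hcl : m.contains l = false := by
            cases hcl : m.contains l with
            | true => exact absurd ((hc l).1 hcl) hm
            | false => rfl
          rw [if_neg (by simp [he, hcl]), if_neg hm]
          rw [ih (m.insert l ("Speaker " ++ PySem.Int.toStr i)) (i + 1) (seen ++ [l])
                (PySem.Dict.nodup_keys_insert m l _ hnd)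
                (by intro x
                    rw [PySem.Dict.contains_insert]
                    simp only [Bool.or_eq_true, beq_iff_eq, hc x, List.mem_append,
                      List.mem_singleton]
                    tauto)]
          rw [PySem.Dict.items_insert_of_not_contains m _ hcl]
          simp [pvNumberFrom]

-- the distinct truthy labels of a prefix, as B computes them
def pvSeenOf (D : List (Option String)) : List String :=
  PySem.Set.ofList (D.filterMap pvTruthy)

theorem pvSeenOf_snoc (D : List (Option String)) (o : Option String) :
    pvSeenOf (D ++ [o]) = match pvTruthy o with
      | none => pvSeenOf D
      | some l => PySem.Set.add (pvSeenOf D) l := by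
  cases h : pvTruthy o <;>
    simp [pvSeenOf, PySem.Set.ofList_eq_foldl, List.filterMap_append, h]

theorem pvMem_seenOf (D : List (Option String)) (l : String) (hl : l ≠ "") :
    l ∈ pvSeenOf D ↔ some l ∈ D := by
  rw [pvSeenOf, PySem.Set.mem_ofList, List.mem_filterMap]
  constructor
  · rintro ⟨o, ho, ht⟩
    cases o with
    | none => simp [pvTruthy] at ht
    | some x =>
      simp only [pvTruthy] at ht
      split at ht
      · exact absurd ht (by simp)
      · cases ht; exact ho
  · intro h
    exact ⟨some l, h, by simp [pvTruthy, hl]⟩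

-- B's comprehension, started after an already-scanned prefix D, equals numbering the
-- fresh labels of the rest from 1 + (distinct truthy labels of D)
theorem pvB_eq (R D : List (Option String)) :
    (PySem.List.enumerate R (D.length : Int)).filterMap (pvPick (D ++ R))
      = pvNumberFrom (((pvSeenOf D).length : Int) + 1) (pvCollect R (pvSeenOf D)) := by
  induction R generalizing D with
  | nil => simp [PySem.List.enumerate_nil, pvCollect, pvNumberFrom]
  | cons o R ih =>
    rw [PySem.List.enumerate_cons, List.filterMap_cons]
    have hsl : PySem.List.slice (D ++ o :: R) none (some (D.length : Int)) = D := by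
      rw [PySem.List.slice_to_natCast, List.take_left]
    have hstep : ∀ D' : List (Option String), D' = D ++ [o] →
        (PySem.List.enumerate R ((D.length : Int) + 1)).filterMap (pvPick (D ++ o :: R))
          = pvNumberFrom (((pvSeenOf D').length : Int) + 1) (pvCollect R (pvSeenOf D')) := by
      intro D' hD'
      have := ih D'
      rw [hD'] at this ⊢
      simpa [List.append_assoc] using this
    cases o with
    | none =>
      rw [show pvPick (D ++ none :: R) ((D.length : Int), none) = none from rfl]
      simp only [pvCollect, pvTruthy]
      rw [hstep (D ++ [none]) rfl, pvSeenOf_snoc]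
      simp [pvTruthy]
    | some l =>
      by_cases he : l = ""
      · subst he
        have : pvPick (D ++ some "" :: R) ((D.length : Int), some "") = none := by
          simp [pvPick]
        rw [this]
        simp only [pvCollect, pvTruthy]
        rw [hstep (D ++ [some ""]) rfl, pvSeenOf_snoc]
        simp [pvTruthy]
      · simp only [pvCollect, pvTruthy, if_neg he]
        by_cases hm : l ∈ pvSeenOf D
        · have hmem : some l ∈ D := (pvMem_seenOf D l he).1 hm
          have : pvPick (D ++ some l :: R) ((D.length : Int), some l) = none := by
            simp [pvPick, hsl, hmem]
          rw [this, if_pos hm, hstep (D ++ [some l]) rfl, pvSeenOf_snoc]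
          simp only [pvTruthy, if_neg he]
          rw [PySem.Set.add_eq_ite, if_pos (by simpa [PySem.Set.contains] using hm)]
        · have hmem : some l ∉ D := fun h => hm ((pvMem_seenOf D l he).2 h)
          have : pvPick (D ++ some l :: R) ((D.length : Int), some l)
              = some (l, "Speaker " ++ PySem.Int.toStr (((pvSeenOf D).length : Int) + 1)) := by
            simp [pvPick, hsl, he, hmem, pvSeenOf]
          rw [this, if_neg hm, hstep (D ++ [some l]) rfl, pvSeenOf_snoc]
          simp only [pvTruthy, if_neg he]
          rw [PySem.Set.add_eq_ite, if_neg (by simpa [PySem.Set.contains] using hm)]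
          simp only [pvNumberFrom, List.length_append, List.length_singleton]
          congr 2

-- ===== VERDICT (by name: the statement is the Claim_ definition above) =====
theorem build_speaker_map_py_spec : Claim_equal_build_speaker_map_py := by
  intro segments _
  show build_speaker_map_py segments = build_speaker_map_py_alt segments
  rw [build_speaker_map_py,
    pvFoldA_items segments PySem.Dict.empty 1 [] (by simp [PySem.Dict.keys_empty])
      (by intro l; simp [PySem.Dict.contains_empty])]
  show _ = (PySem.List.enumerate (segments.map pvLabelOf) 0).filterMap
      (pvPick (segments.map pvLabelOf))
  have := pvB_eq (segments.map pvLabelOf) []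
  simp only [List.length_nil, Nat.cast_zero, List.nil_append] at this
  rw [this]
  simp [pvSeenOf, PySem.Dict.empty]
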